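-- pv_equiv track=rewrite | github.com/ftsrg/mbse-assistant | agent_evaluation/create_result_plots.py | flatten_cli_values
-- ===== SOURCE A (Python) =====
-- def flatten_cli_values(values: list[str] | None) -> list[str] | None:
--     """
--     Normalize CLI filter values.
--
--     Supports both:
--     - space-separated arguments
--     - comma-separated values inside one argument
--
--     Example:
--         ["a", "b,c"] -> ["a", "b", "c"]
--     """
--     if not values:
--         return None
--
--     out: list[str] = []
--     for raw in values:
--         for part in str(raw).split(","):
--             part = part.strip()
--             if part:
--                 out.append(part)
--
--     return out or None
-- ===== SOURCE B (Python) =====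
-- def flatten_cli_values(values):
--     """
--     Normalize CLI filter values.
--
--     Character-level streaming tokenizer: scans every argument character by
--     character, flushing the current token at commas and argument boundaries.
--     Whitespace is handled lazily (leading space ignored, interior space
--     buffered until a non-space char arrives), so no split/strip calls at all.
--     """
--     if not values:
--         return None
--
--     out = []
--     cur = ""   # token so far, already left-trimmed, ends in a non-space char
--     pend = ""  # buffered whitespace run after cur (dropped if token ends here)
--
--     def flush():
--         nonlocal cur, pend
--         if cur:
--             out.append(cur)
--         cur = ""
--         pend = ""
--
--     for raw in values:
--         for ch in str(raw):
--             if ch == ",":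
--                 flush()
--             elif ch.isspace():
--                 if cur:
--                     pend += ch
--             else:
--                 cur += pend + ch
--                 pend = ""
--         flush()
--
--     return out or None
-- ===== Notes on version B (the rewrite author's own statement) =====
-- stated objective: alternative
-- what changed: Replaces A's split/strip/filter over comma pieces by a character-level streaming state machine (current-token + pending-whitespace buffers, flushed at commas and argument boundaries) that never calls split or strip.
import Mathlib
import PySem

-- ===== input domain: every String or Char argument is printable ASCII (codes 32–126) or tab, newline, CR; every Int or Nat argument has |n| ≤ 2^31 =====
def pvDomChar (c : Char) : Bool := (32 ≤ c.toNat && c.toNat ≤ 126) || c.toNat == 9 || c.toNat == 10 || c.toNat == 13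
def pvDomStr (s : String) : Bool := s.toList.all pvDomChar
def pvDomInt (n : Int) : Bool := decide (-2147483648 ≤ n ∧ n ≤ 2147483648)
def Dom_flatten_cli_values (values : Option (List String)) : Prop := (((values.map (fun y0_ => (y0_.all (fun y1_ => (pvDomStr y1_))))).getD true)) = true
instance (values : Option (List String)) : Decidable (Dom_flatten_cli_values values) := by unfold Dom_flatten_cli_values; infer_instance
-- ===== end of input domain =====

-- B is a character-level streaming tokenizer (token + pending-whitespace buffers, flushed
-- at commas and argument boundaries) instead of A's split/strip/filter (objective: alternative).


-- ===== PORT A =====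
-- nested loops: for raw in values: for part in raw.split(","): strip, append if nonempty
def flatten_cli_values (values : Option (List String)) : Option (List String) :=
  match values with
  | none => none
  | some vs =>
    if vs = [] then none
    else
      let out : List String := vs.foldl (fun out raw =>
        ((PySem.Str.split? raw ",").getD []).foldl (fun out part =>
          let part := PySem.Str.strip part
          if part ≠ "" then out ++ [part] else out) out) []
      if out = [] then none else some out

-- ===== PORT B =====
-- streaming tokenizer state: (out, cur, pend); flush() appends cur if nonempty and resets
def pvFlush (s : List String × List Char × List Char) : List String × List Char × List Char :=
  if s.2.1 ≠ [] then (s.1 ++ [String.ofList s.2.1], [], []) else (s.1, [], [])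

-- one character of B's inner loop: comma flushes, whitespace is buffered, else cur += pend + ch
def pvStepC (s : List String × List Char × List Char) (c : Char) :
    List String × List Char × List Char :=
  if c = ',' then pvFlush s
  else if PySem.Chars.isspace c then
    (if s.2.1 = [] then s else (s.1, s.2.1, s.2.2 ++ [c]))
  else (s.1, s.2.1 ++ s.2.2 ++ [c], [])

def flatten_cli_values_alt (values : Option (List String)) : Option (List String) :=
  match values with
  | none => none
  | some vs =>
    if vs = [] then none
    else
      let fin := vs.foldl (fun s raw => pvFlush (raw.toList.foldl pvStepC s)) ([], [], [])
      if fin.1 = [] then none else some fin.1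

-- ===== PRECONDITION & SPEC =====
def Spec_flatten_cli_values (values : Option (List String)) (out : Option (List String)) : Prop := out = flatten_cli_values_alt values
instance (values : Option (List String)) (out : Option (List String)) : Decidable (Spec_flatten_cli_values values out) := by unfold Spec_flatten_cli_values; infer_instance

-- ===== CLAIM (what is proved, stated in full; the proofs are below) =====
def Claim_equal_flatten_cli_values : Prop := ∀ (values : Option (List String)), Dom_flatten_cli_values values → Spec_flatten_cli_values values (flatten_cli_values values)

-- ===== LEMMAS AND PROOFS =====

theorem splitOn_no_comma (cur : List Char) (hc : ',' ∉ cur) :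
    cur.splitOn ',' = [cur] := by
  unfold List.splitOn
  refine List.splitOnP_eq_single (p := (· == ',')) cur ?_
  intro x hx
  simp only [beq_iff_eq]
  intro hEq
  exact hc (hEq ▸ hx)

-- PySem's comma split agrees with Mathlib's List.splitOn on the char list
theorem go_splitOn (fuel : Nat) (l cur : List Char) (acc : List (List Char))
    (hf : l.length ≤ fuel) (hc : ',' ∉ cur) :
    PySem.Chars.splitOn.go [','] fuel l cur acc
      = acc.reverse ++ (cur.reverse ++ l).splitOn ',' := by
  induction fuel generalizing l cur acc with
  | zero =>
    have : l = [] := List.length_eq_zero_iff.mp (Nat.le_zero.mp hf)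
    subst this
    simp [PySem.Chars.splitOn.go, splitOn_no_comma cur.reverse (by simpa using hc)]
  | succ fuel ih =>
    cases l with
    | nil =>
      simp [PySem.Chars.splitOn.go, splitOn_no_comma cur.reverse (by simpa using hc)]
    | cons c rest =>
      have hf' : rest.length ≤ fuel := by simpa using hf
      by_cases hcomma : c = ','
      · subst hcomma
        have hpre : [','].isPrefixOf (',' :: rest) = true := by simp [List.isPrefixOf]
        rw [PySem.Chars.splitOn.go]
        simp only [hpre, if_pos]
        have hd : List.drop [','].length (',' :: rest) = rest := by simp
        rw [hd, ih rest [] (cur.reverse :: acc) hf' (by simp)]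
        have hsp : (cur.reverse ++ ',' :: rest).splitOn ','
            = cur.reverse :: rest.splitOn ',' := by
          unfold List.splitOn
          refine List.splitOnP_first (· == ',') cur.reverse ?_ ',' (by simp) rest
          intro x hx
          simp only [beq_iff_eq]
          intro hEq
          exact hc (List.mem_reverse.mp (hEq ▸ hx))
        simp [hsp]
      · have hpre : [','].isPrefixOf (c :: rest) = false := by
          simp [List.isPrefixOf]
          exact fun h => hcomma h.symm
        rw [PySem.Chars.splitOn.go]
        simp only [hpre]
        rw [if_neg (by simp)]
        rw [ih rest (c :: cur) acc hf' (by
          intro h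
          rcases List.mem_cons.mp h with h | h
          · exact hcomma h.symm
          · exact hc h)]
        simp

theorem charsSplitOn_eq (s : List Char) :
    PySem.Chars.splitOn s [','] = s.splitOn ',' := by
  unfold PySem.Chars.splitOn
  rw [go_splitOn (s.length + 1) s [] [] (by omega) (by simp)]
  simp

-- the comma pieces of the values, as A's inner loop produces them
def pvPieces (vs : List String) : List String :=
  vs.flatMap (fun raw => (raw.toList.splitOn ',').map String.ofList)

-- A's inner loop body, named for the proofs (definitionally the port's lambda)
def pvStep (out : List String) (part : String) : List String :=
  let part := PySem.Str.strip part
  if part ≠ "" then out ++ [part] else out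

theorem split_raw (raw : String) :
    (PySem.Str.split? raw ",").getD []
      = (raw.toList.splitOn ',').map String.ofList := by
  simp [PySem.Str.split?, PySem.Chars.split?, charsSplitOn_eq]

theorem inner_fold_eq (l : List String) (out : List String) :
    l.foldl pvStep out
      = out ++ (l.map PySem.Str.strip).filter (fun p => p ≠ "") := by
  induction l generalizing out with
  | nil => simp
  | cons x xs ih =>
    rw [List.foldl_cons]
    by_cases hx : PySem.Str.strip x ≠ ""
    · have hs : pvStep out x = out ++ [PySem.Str.strip x] := by simp [pvStep, hx]
      rw [hs, ih]
      simp [hx]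
    · have hs : pvStep out x = out := by simp [pvStep, hx]
      rw [hs, ih]
      simp at hx
      simp [hx]

theorem a_out_eq (vs : List String) :
    vs.foldl (fun out raw =>
        ((PySem.Str.split? raw ",").getD []).foldl (fun out part =>
          let part := PySem.Str.strip part
          if part ≠ "" then out ++ [part] else out) out) []
      = ((pvPieces vs).map PySem.Str.strip).filter (fun p => p ≠ "") := by
  calc vs.foldl (fun out raw =>
        ((PySem.Str.split? raw ",").getD []).foldl pvStep out) []
      = vs.foldl (fun out raw => out ++
          ((((raw.toList.splitOn ',').map String.ofList).map
            PySem.Str.strip).filter (fun p => p ≠ ""))) [] := by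
        refine PySem.List.foldl_congr_mem vs _ _ [] ?_
        intro acc x _
        rw [inner_fold_eq, split_raw]
    _ = vs.flatMap (fun raw => (((raw.toList.splitOn ',').map String.ofList).map
            PySem.Str.strip).filter (fun p => p ≠ "")) := by
        rw [PySem.List.foldl_append_eq_flatMap]; simp
    _ = ((pvPieces vs).map PySem.Str.strip).filter (fun p => p ≠ "") := by
        simp [pvPieces, List.map_flatMap, List.filter_flatMap]

-- ---- B-side lemmas: the machine on a comma-free run computes strip ----

-- the tokens one comma-free piece contributes, in String form
def pvTok (t : List Char) : List String :=
  if PySem.Chars.strip t ≠ [] then [String.ofList (PySem.Chars.strip t)] else []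

theorem run_nonempty (p : List Char) (hp : ',' ∉ p) :
    ∀ (out : List String) (d : List Char) (c : Char) (pend : List Char),
      PySem.Chars.isspace c = false → pend.all PySem.Chars.isspace →
      p.foldl pvStepC (out, d ++ [c], pend)
        = (out, PySem.Chars.rstrip (d ++ [c] ++ pend ++ p),
           (p.foldl pvStepC (out, d ++ [c], pend)).2.2) := by
  induction p with
  | nil =>
    intro out d c pend hc hpend
    simp only [List.foldl_nil, List.append_nil]
    have h1 : pend.reverse.dropWhile PySem.Chars.isspace = [] := by
      rw [List.dropWhile_eq_nil_iff]
      intro x hx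
      exact List.all_eq_true.mp hpend x (List.mem_reverse.mp hx)
    have hr : PySem.Chars.rstrip (d ++ [c] ++ pend) = d ++ [c] := by
      unfold PySem.Chars.rstrip
      rw [List.reverse_append, List.reverse_append, List.dropWhile_append, h1]
      simp [hc]
    rw [hr]
  | cons x xs ih =>
    intro out d c pend hc hpend
    have hx : x ≠ ',' := fun h => hp (h ▸ List.mem_cons_self)
    rw [List.foldl_cons]
    by_cases hws : PySem.Chars.isspace x
    · have hstep : pvStepC (out, d ++ [c], pend) x = (out, d ++ [c], pend ++ [x]) := by
        simp [pvStepC, hx, hws]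
      rw [hstep, ih (fun h => hp (List.mem_cons_of_mem _ h)) out d c (pend ++ [x]) hc
        (by simp [List.all_eq_true] at hpend ⊢; exact ⟨hpend, hws⟩)]
      congr 2
      simp
    · have hstep : pvStepC (out, d ++ [c], pend) x = (out, (d ++ [c]) ++ pend ++ [x], []) := by
        simp [pvStepC, hx, hws]
      rw [hstep]
      have : (d ++ [c]) ++ pend ++ [x] = ((d ++ [c]) ++ pend) ++ [x] := by simp
      rw [this, ih (fun h => hp (List.mem_cons_of_mem _ h)) out ((d ++ [c]) ++ pend) x []
        (by simpa using hws) (by simp)]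
      congr 2
      simp

theorem run_empty (p : List Char) (hp : ',' ∉ p) (out : List String) :
    p.foldl pvStepC (out, [], [])
      = (out, PySem.Chars.strip p, (p.foldl pvStepC (out, [], [])).2.2) := by
  induction p with
  | nil => simp [PySem.Chars.strip, PySem.Chars.lstrip, PySem.Chars.rstrip]
  | cons x xs ih =>
    have hx : x ≠ ',' := fun h => hp (h ▸ List.mem_cons_self)
    rw [List.foldl_cons]
    by_cases hws : PySem.Chars.isspace x
    · have hstep : pvStepC (out, [], []) x = (out, [], []) := by
        simp [pvStepC, hx, hws]
      rw [hstep, ih (fun h => hp (List.mem_cons_of_mem _ h))]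
      have : PySem.Chars.strip (x :: xs) = PySem.Chars.strip xs := by
        simp [PySem.Chars.strip, PySem.Chars.lstrip, hws]
      rw [this]
    · have hstep : pvStepC (out, [], []) x = (out, [] ++ [x], []) := by
        simp [pvStepC, hx, hws]
      rw [hstep, run_nonempty xs (fun h => hp (List.mem_cons_of_mem _ h)) out [] x []
        (by simpa using hws) (by simp)]
      have : PySem.Chars.strip (x :: xs) = PySem.Chars.rstrip ([] ++ [x] ++ [] ++ xs) := by
        simp [PySem.Chars.strip, PySem.Chars.lstrip, hws]
      rw [this]

theorem piece_flush (p : List Char) (hp : ',' ∉ p) (out : List String) :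
    pvFlush (p.foldl pvStepC (out, [], [])) = (out ++ pvTok p, [], []) := by
  rw [run_empty p hp out]
  by_cases h : PySem.Chars.strip p = []
  · simp [pvFlush, pvTok, h]
  · simp [pvFlush, pvTok, h]

-- flushing after the whole char list = the filtered stripped comma pieces
theorem run_decomp (n : Nat) : ∀ (l : List Char), l.length ≤ n → ∀ (out : List String),
    pvFlush (l.foldl pvStepC (out, [], []))
      = (out ++ (l.splitOn ',').flatMap pvTok, [], []) := by
  induction n with
  | zero =>
    intro l hl out
    have : l = [] := List.length_eq_zero_iff.mp (Nat.le_zero.mp hl)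
    subst this
    simp [pvFlush, pvTok, PySem.Chars.strip, PySem.Chars.lstrip, PySem.Chars.rstrip,
      List.splitOn]
  | succ n ih =>
    intro l hl out
    by_cases hmem : ',' ∈ l
    · set t := l.takeWhile (· ≠ ',') with ht
      have hne : l.dropWhile (· ≠ ',') ≠ [] := by
        intro h
        have h2 : ∀ x ∈ l, ¬ x = ',' := by
          simpa using List.dropWhile_eq_nil_iff.mp h
        exact h2 ',' hmem rfl
      have hdrop : l.dropWhile (· ≠ ',') = ',' :: (l.dropWhile (· ≠ ',')).tail := by
        obtain ⟨y, r0, hd⟩ := List.exists_cons_of_ne_nil hne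
        have h1 : (l.dropWhile (· ≠ ',')).head? = some y := by rw [hd]; rfl
        rw [List.head?_eq_some_head hne] at h1
        have hy : (l.dropWhile (· ≠ ',')).head hne = y := Option.some_inj.mp h1
        have hh := List.head_dropWhile_not (p := (· ≠ ',')) hne
        rw [hy] at hh
        have hyc : y = ',' := by simpa using hh
        rw [hd, hyc]
        simp
      set r := (l.dropWhile (· ≠ ',')).tail with hr
      have hsplit : l = t ++ ',' :: r := by
        conv_lhs => rw [← List.takeWhile_append_dropWhile (p := (· ≠ ',')) (l := l)]
        rw [hdrop]
      have htnc : ',' ∉ t := by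
        intro h
        have := List.mem_takeWhile_imp h
        simp at this
      have hrlen : r.length ≤ n := by
        have := congrArg List.length hsplit
        simp at this
        omega
      rw [hsplit, List.foldl_append, List.foldl_cons]
      have hcomma : ∀ s, pvStepC s ',' = pvFlush s := by
        intro s; simp [pvStepC]
      rw [hcomma, piece_flush t htnc out, ih r hrlen (out ++ pvTok t)]
      have hsp : (t ++ ',' :: r).splitOn ',' = t :: r.splitOn ',' := by
        unfold List.splitOn
        refine List.splitOnP_first (· == ',') t ?_ ',' (by simp) r
        intro x hx
        simp only [beq_iff_eq]
        intro hEq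
        exact htnc (hEq ▸ hx)
      rw [hsp]
      simp
    · rw [piece_flush l hmem out, splitOn_no_comma l hmem]
      simp

-- B's outer fold over the raw arguments
theorem b_fold_eq (vs : List String) : ∀ (out : List String),
    vs.foldl (fun s raw => pvFlush (raw.toList.foldl pvStepC s)) (out, [], [])
      = (out ++ vs.flatMap (fun raw => (raw.toList.splitOn ',').flatMap pvTok), [], []) := by
  induction vs with
  | nil => simp
  | cons v vt ih =>
    intro out
    rw [List.foldl_cons, run_decomp v.toList.length v.toList (Nat.le_refl _) out,
      ih (out ++ (v.toList.splitOn ',').flatMap pvTok)]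
    simp

theorem ofList_ne_empty (t : List Char) : (String.ofList t ≠ "") ↔ t ≠ [] := by
  constructor
  · intro h ht; exact h (ht ▸ rfl)
  · intro h he
    have := congrArg String.toList he
    simp at this
    exact h this

theorem strip_ofList (t : List Char) :
    PySem.Str.strip (String.ofList t) = String.ofList (PySem.Chars.strip t) := by
  apply String.ext
  rw [PySem.Str.toList_strip]
  simp

-- one raw's pieces: A's strip-then-filter pipeline equals B's pvTok tokens
theorem tok_list (ps : List (List Char)) :
    (ps.filter (fun t => decide (PySem.Str.strip (String.ofList t) ≠ ""))).map
        (fun t => PySem.Str.strip (String.ofList t)) = ps.flatMap pvTok := by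
  have hmap : (fun t => PySem.Str.strip (String.ofList t))
      = (fun t => String.ofList (PySem.Chars.strip t)) := by
    funext t; exact strip_ofList t
  have hfil : (fun t => decide (PySem.Str.strip (String.ofList t) ≠ ""))
      = (fun t => !decide (PySem.Chars.strip t = [])) := by
    funext t
    rw [strip_ofList]
    by_cases h : PySem.Chars.strip t = []
    · simp [h]
    · simp [h, (ofList_ne_empty _).mpr h]
  rw [hmap, hfil]
  induction ps with
  | nil => simp
  | cons t ts ih =>
    simp only [List.filter_cons, List.flatMap_cons]
    by_cases h : PySem.Chars.strip t = []
    · simp [pvTok, h, ih]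
    · simp [pvTok, h, ih]

-- A's string-level pipeline per piece equals B's pvTok, hence the two outputs agree
theorem outputs_eq (vs : List String) :
    ((pvPieces vs).map PySem.Str.strip).filter (fun p => p ≠ "")
      = vs.flatMap (fun raw => (raw.toList.splitOn ',').flatMap pvTok) := by
  unfold pvPieces
  rw [List.map_flatMap, List.filter_flatMap]
  apply List.flatMap_congr
  intro raw _
  rw [List.map_map, List.filter_map]
  simp only [Function.comp_def]
  exact tok_list _

-- ===== VERDICT (by name: the statement is the Claim_ definition above) =====
theorem flatten_cli_values_spec : Claim_equal_flatten_cli_values := by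
  intro values _
  unfold Spec_flatten_cli_values flatten_cli_values flatten_cli_values_alt
  cases values with
  | none => rfl
  | some vs =>
    by_cases h : vs = []
    · simp [h]
    · simp only [h, if_false]
      rw [a_out_eq, b_fold_eq vs [], outputs_eq]
      simp
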